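-- pv_equiv track=rewrite | github.com/sunjae0902/backjoon | 프로그래머스/3/152995. 인사고과/인사고과.py | solution
-- ===== SOURCE A (Python) =====
-- def solution(scores):
--     answer = 0
--     scores = [[i, score[0], score[1], 0] for i, score in enumerate(scores)]
--     scores.sort(key=lambda x: (-x[1], x[2]))  # 점수1 내림차순, 점수2 오름차순
--
--     tmp = set()
--     max_b = -1
--     for i in range(len(scores)):
--         if scores[i][2] < max_b:
--             tmp.add(scores[i][0])
--         else:
--             max_b = scores[i][2]
--
--     if 0 in tmp:
--         return -1
--     rank = [score for score in scores if score[0] not in tmp]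
--     rank.sort(reverse=True, key= lambda x: x[1]+x[2])
--     rank[0][3] = 1
--     for i in range(1, len(rank)):
--         if rank[i][1] + rank[i][2] == rank[i-1][1] + rank[i-1][2]:
--             rank[i][3] = rank[i-1][3]
--         else:
--             rank[i][3] = i+1
--     for i in range(len(rank)):
--         if rank[i][0] == 0:
--             answer = rank[i][3]
--             break
--     return answer
-- ===== SOURCE B (Python) =====
-- def solution(scores):
--     pts = [(s[0], s[1]) for s in scores]
--
--     def dominated(x, y):
--         return any(a > x and b > y for (a, b) in pts)
--
--     x0, y0 = pts[0]
--     if dominated(x0, y0):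
--         return -1
--     target = x0 + y0
--     return 1 + sum(1 for (x, y) in pts if x + y > target and not dominated(x, y))
-- ===== Notes on version B (the rewrite author's own statement) =====
-- stated objective: simpler
-- what changed: Replaces A's enumerate/tag, two stable sorts, sweep-with-running-max and in-place rank-assignment loop by direct pairwise tests: a nested any() scan decides strict domination and the answer is 1 plus the count of non-dominated employees with a strictly larger score sum; Pre_ excludes only the inputs where A raises IndexError (empty list, rows shorter than 2).
-- intended difference: On inputs where an employee whose second score is below -1 is strictly dominated by nobody and that matters for employee 0 (it is employee 0 itself, or it has a larger score sum), A's sweep initialisation max_b = -1 wrongly tags that employee as dominated, so A returns -1 (or a too-small rank) while B returns the rank counting only genuinely dominated employees as removed, which is the intended value. — e.g. on solution([[0, -2]]): A returns -1, B returns 1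
import Mathlib
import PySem

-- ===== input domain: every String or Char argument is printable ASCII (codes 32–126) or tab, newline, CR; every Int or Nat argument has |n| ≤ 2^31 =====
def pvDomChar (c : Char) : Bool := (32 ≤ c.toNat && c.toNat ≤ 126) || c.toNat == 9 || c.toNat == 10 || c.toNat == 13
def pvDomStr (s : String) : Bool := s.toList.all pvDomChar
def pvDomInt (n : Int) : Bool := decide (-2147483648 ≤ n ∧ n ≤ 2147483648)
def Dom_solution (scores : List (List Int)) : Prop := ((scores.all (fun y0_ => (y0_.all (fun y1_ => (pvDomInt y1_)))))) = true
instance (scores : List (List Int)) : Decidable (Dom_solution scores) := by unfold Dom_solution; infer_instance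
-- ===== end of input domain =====

-- B replaces A's tag/sort/sweep/rank machinery by direct pairwise strict-domination tests
-- (simpler, not faster).  A mutates its argument in Python; only the return value is compared.

-- ===== PORT A =====
abbrev Quad := Int × Int × Int × Int

-- score[0] / score[1] of a row (Python's indexing, exact for rows of length ≥ 2)
def rowX (s : List Int) : Int := PySem.List.pyGetD s 0 0
def rowY (s : List Int) : Int := PySem.List.pyGetD s 1 0

def sweepA : List Quad → Int → PySem.Set Int → PySem.Set Int
  | [], _, tmp => tmp
  | q :: rest, maxb, tmp =>
      if q.2.2.1 < maxb then sweepA rest maxb (PySem.Set.add tmp q.1)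
      else sweepA rest q.2.2.1 tmp

def rankLoopA : List Quad → Int → Int → Int → List Quad
  | [], _, _, _ => []
  | q :: rest, prevSum, prevRank, i =>
      let s := q.2.1 + q.2.2.1
      let r := if s = prevSum then prevRank else i + 1
      (q.1, q.2.1, q.2.2.1, r) :: rankLoopA rest s r (i + 1)

def findAnsA : List Quad → Int
  | [] => 0
  | q :: rest => if q.1 = 0 then q.2.2.2 else findAnsA rest

def solution (scores : List (List Int)) : Int :=
  let tagged := (PySem.List.enumerate scores).map
      (fun p => (p.1, rowX p.2, rowY p.2, (0 : Int)))
  let ss := PySem.List.sorted2 tagged (fun q => -q.2.1) (fun q => q.2.2.1)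
  let tmp := sweepA ss (-1) PySem.Set.empty
  if PySem.Set.contains tmp 0 then -1
  else
    let rank := ss.filter (fun q => !(PySem.Set.contains tmp q.1))
    let rank2 := PySem.List.sorted rank (fun q => q.2.1 + q.2.2.1) true
    match rank2 with
    | [] => 0
    | q0 :: rest =>
        findAnsA ((q0.1, q0.2.1, q0.2.2.1, (1 : Int)) :: rankLoopA rest (q0.2.1 + q0.2.2.1) 1 1)

-- ===== PORT B =====
def dominatedB (pts : List (Int × Int)) (x y : Int) : Bool :=
  pts.any (fun p => x < p.1 && y < p.2)

def solution_alt (scores : List (List Int)) : Int :=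
  let pts := scores.map (fun s => (PySem.List.pyGetD s 0 0, PySem.List.pyGetD s 1 0))
  match pts with
  | [] => 0
  | (x0, y0) :: _ =>
      if dominatedB pts x0 y0 then -1
      else 1 + (pts.countP (fun p => decide (x0 + y0 < p.1 + p.2) && !dominatedB pts p.1 p.2) : Int)

-- ===== PRECONDITION & SPEC =====
-- Python A raises IndexError on an empty list (rank[0]) and on any row with fewer than
-- two entries (score[1]); Pre_ excludes exactly those.
def Pre_solution (scores : List (List Int)) : Prop :=
  scores ≠ [] ∧ ∀ s ∈ scores, 2 ≤ s.length
instance (scores : List (List Int)) : Decidable (Pre_solution scores) := by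
  unfold Pre_solution; infer_instance
def pvWitness_solution : List (List Int) := [[5, 5], [1, 2]]

-- s is dominated by nobody in g (no one beats it strictly on both scores)
def pvU (g : List (List Int)) (s : List Int) : Prop :=
  ∀ t ∈ g, rowX t ≤ rowX s ∨ rowY t ≤ rowY s

-- On inputs where an employee with second score below -1 is strictly dominated by nobody
-- and that matters for employee 0 (it is employee 0 itself, or it outsums an undominated
-- employee 0), A's sweep (max_b initialised to -1) wrongly tags that employee as dominated,
-- so A returns -1 (or a too-small rank) while B returns the rank that counts only genuinely
-- dominated employees as removed, which is the intended value.
def D_solution (scores : List (List Int)) : Prop :=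
  ∃ s ∈ scores, rowY s < -1 ∧ pvU scores s ∧ pvU scores scores.headI ∧
    (s = scores.headI ∨ rowX scores.headI + rowY scores.headI < rowX s + rowY s)
instance (scores : List (List Int)) : Decidable (D_solution scores) := by
  unfold D_solution pvU; infer_instance

def Spec_solution (scores : List (List Int)) (out : Int) : Prop :=
  ¬ D_solution scores → out = solution_alt scores
instance (scores : List (List Int)) (out : Int) : Decidable (Spec_solution scores out) := by unfold Spec_solution; infer_instance

def pvDiffWitness_solution : List (List Int) := [[0, -2]]
def pvDiffWitnessOut_solution : Int × Int := (-1, 1)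

-- ===== CLAIM (what is proved, stated in full; the proofs are below) =====
def Claim_unchanged_solution : Prop := ∀ (scores : List (List Int)), Dom_solution scores → Pre_solution scores → Spec_solution scores (solution scores)
def Claim_changed_solution : Prop := Dom_solution (pvDiffWitness_solution) ∧ Pre_solution (pvDiffWitness_solution) ∧ D_solution (pvDiffWitness_solution) ∧ solution (pvDiffWitness_solution) = pvDiffWitnessOut_solution.1 ∧ solution_alt (pvDiffWitness_solution) = pvDiffWitnessOut_solution.2 ∧ pvDiffWitnessOut_solution.1 ≠ pvDiffWitnessOut_solution.2
def Claim_exact_solution : Prop := ∀ (scores : List (List Int)), Dom_solution scores → Pre_solution scores → D_solution scores → solution scores ≠ solution_alt scores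

-- ===== LEMMAS AND PROOFS =====

def sumQ (q : Quad) : Int := q.2.1 + q.2.2.1

-- "a may come before b" for A's first sort key (-x, y): lexicographic
def lexLe (a b : Quad) : Prop := b.2.1 < a.2.1 ∨ (a.2.1 = b.2.1 ∧ a.2.2.1 ≤ b.2.2.1)

def tagT (scores : List (List Int)) : List Quad :=
  (PySem.List.enumerate scores).map
    (fun p => (p.1, rowX p.2, rowY p.2, (0 : Int)))

-- insertion into a Pairwise-R list stays Pairwise R
theorem pairwise_insertBy {α : Type} (before : α → α → Bool) (R : α → α → Prop)
    (hT : ∀ a b, before a b = true → R a b) (hF : ∀ a b, before a b = false → R b a)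
    (htrans : ∀ a b c, R a b → R b c → R a c)
    (x : α) (l : List α) (hl : l.Pairwise R) :
    (PySem.List.insertBy before x l).Pairwise R := by
  induction l with
  | nil => simp [PySem.List.insertBy]
  | cons y ys ih =>
    rcases List.pairwise_cons.mp hl with ⟨hy, hys⟩
    by_cases hb : before x y = true
    · rw [show PySem.List.insertBy before x (y :: ys) = x :: y :: ys by
        simp [PySem.List.insertBy, hb]]
      refine List.pairwise_cons.mpr ⟨?_, hl⟩
      intro z hz
      rcases List.mem_cons.mp hz with rfl | hz'
      · exact hT _ _ hb
      · exact htrans _ _ _ (hT _ _ hb) (hy _ hz')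
    · rw [show PySem.List.insertBy before x (y :: ys) = y :: PySem.List.insertBy before x ys by
        simp [PySem.List.insertBy, hb]]
      refine List.pairwise_cons.mpr ⟨?_, ih hys⟩
      intro z hz
      rcases (PySem.List.mem_insertBy before x z ys).mp hz with rfl | hz'
      · exact hF _ _ (by simpa using hb)
      · exact hy _ hz'

theorem pairwise_foldl_insertBy {α : Type} (before : α → α → Bool) (R : α → α → Prop)
    (hT : ∀ a b, before a b = true → R a b) (hF : ∀ a b, before a b = false → R b a)
    (htrans : ∀ a b c, R a b → R b c → R a c)
    (xs acc : List α) (hacc : acc.Pairwise R) :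
    (xs.foldl (fun acc x => PySem.List.insertBy before x acc) acc).Pairwise R := by
  induction xs generalizing acc with
  | nil => exact hacc
  | cons x xs ih =>
    exact ih _ (pairwise_insertBy before R hT hF htrans x acc hacc)

theorem sorted2_pairwise_lexLe (xs : List Quad) :
    (PySem.List.sorted2 xs (fun q => -q.2.1) (fun q => q.2.2.1)).Pairwise lexLe := by
  have h := pairwise_foldl_insertBy
      (fun a b : Quad =>
        decide (-a.2.1 < -b.2.1) || (!decide (-b.2.1 < -a.2.1) && decide (a.2.2.1 < b.2.2.1)))
      lexLe
      (by intro a b hab; unfold lexLe; simp at hab; omega)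
      (by intro a b hab; unfold lexLe; simp at hab; omega)
      (by intro a b c h1 h2; unfold lexLe at *; omega)
      xs [] List.Pairwise.nil
  simpa [PySem.List.sorted2] using h

theorem sweepA_mem (L : List Quad) (hL : L.Pairwise lexLe) :
    ∀ (maxb : Int) (tmp : PySem.Set Int) (z : Int),
      z ∈ sweepA L maxb tmp ↔
        z ∈ tmp ∨ ∃ q ∈ L, q.1 = z ∧
          (q.2.2.1 < maxb ∨ ∃ q' ∈ L, q.2.1 < q'.2.1 ∧ q.2.2.1 < q'.2.2.1) := by
  induction L with
  | nil => intro maxb tmp z; simp [sweepA]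
  | cons q rest ih =>
    rcases List.pairwise_cons.mp hL with ⟨hq, hrest⟩
    intro maxb tmp z
    by_cases hc : q.2.2.1 < maxb
    · rw [show sweepA (q :: rest) maxb tmp = sweepA rest maxb (PySem.Set.add tmp q.1) by
        simp [sweepA, hc]]
      rw [ih hrest maxb (PySem.Set.add tmp q.1) z]
      constructor
      · rintro (hz | ⟨q'', hq'', hid, hcase⟩)
        · rcases (PySem.Set.mem_add tmp q.1 z).mp hz with h | h
          · exact Or.inl h
          · exact Or.inr ⟨q, List.mem_cons_self, h.symm, Or.inl hc⟩
        · refine Or.inr ⟨q'', List.mem_cons_of_mem _ hq'', hid, ?_⟩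
          rcases hcase with h | ⟨q', hq', hd⟩
          · exact Or.inl h
          · exact Or.inr ⟨q', List.mem_cons_of_mem _ hq', hd⟩
      · rintro (hz | ⟨q'', hq'', hid, hcase⟩)
        · exact Or.inl ((PySem.Set.mem_add tmp q.1 z).mpr (Or.inl hz))
        · rcases List.mem_cons.mp hq'' with rfl | hmem
          · exact Or.inl ((PySem.Set.mem_add tmp q''.1 z).mpr (Or.inr hid.symm))
          · refine Or.inr ⟨q'', hmem, hid, ?_⟩
            rcases hcase with h | ⟨q', hq', hd⟩
            · exact Or.inl h
            · rcases List.mem_cons.mp hq' with rfl | hmem'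
              · -- q' = q dominates q'': then q''.y < q.y < maxb
                exact Or.inl (lt_trans hd.2 hc)
              · exact Or.inr ⟨q', hmem', hd⟩
    · rw [show sweepA (q :: rest) maxb tmp = sweepA rest q.2.2.1 tmp by
        simp [sweepA, hc]]
      rw [ih hrest q.2.2.1 tmp z]
      rw [not_lt] at hc
      constructor
      · rintro (hz | ⟨q'', hq'', hid, hcase⟩)
        · exact Or.inl hz
        · rcases hcase with h | ⟨q', hq', hd⟩
          · -- q''.y < q.y : q dominates q'' (using sortedness q ≼ q'')
            rcases hq _ hq'' with hx | ⟨hxe, hy⟩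
            · exact Or.inr ⟨q'', List.mem_cons_of_mem _ hq'', hid,
                Or.inr ⟨q, List.mem_cons_self, hx, h⟩⟩
            · omega
          · exact Or.inr ⟨q'', List.mem_cons_of_mem _ hq'', hid,
              Or.inr ⟨q', List.mem_cons_of_mem _ hq', hd⟩⟩
      · rintro (hz | ⟨q'', hq'', hid, hcase⟩)
        · exact Or.inl hz
        · rcases List.mem_cons.mp hq'' with rfl | hmem
          · -- q'' = q: its condition must fail
            rcases hcase with h | ⟨q', hq', hd⟩
            · omega
            · rcases List.mem_cons.mp hq' with rfl | hmem'
              · exact absurd hd.1 (lt_irrefl _)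
              · rcases hq _ hmem' with hx | ⟨hxe, hy⟩
                · omega
                · omega
          · refine Or.inr ⟨q'', hmem, hid, ?_⟩
            rcases hcase with h | ⟨q', hq', hd⟩
            · exact Or.inl (lt_of_lt_of_le h hc)
            · rcases List.mem_cons.mp hq' with rfl | hmem'
              · exact Or.inl hd.2
              · exact Or.inr ⟨q', hmem', hd⟩

theorem mem_tagT (scores : List (List Int)) (q : Quad) :
    q ∈ tagT scores ↔ ∃ k, ∃ _ : k < scores.length,
      q = ((k : Int), rowX scores[k], rowY scores[k], (0 : Int)) := by
  unfold tagT
  simp only [List.mem_map, PySem.List.mem_enumerate_iff]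
  constructor
  · rintro ⟨p, ⟨k, hk, rfl⟩, rfl⟩
    exact ⟨k, hk, by simp⟩
  · rintro ⟨k, hk, rfl⟩
    exact ⟨((k : Int), scores[k]), ⟨k, hk, by simp⟩, rfl⟩

theorem tagT_uniq (scores : List (List Int)) (q q' : Quad)
    (h : q ∈ tagT scores) (h' : q' ∈ tagT scores) (he : q.1 = q'.1) : q = q' := by
  rcases (mem_tagT scores q).mp h with ⟨k, hk, rfl⟩
  rcases (mem_tagT scores q').mp h' with ⟨k', hk', rfl⟩
  simp only at he
  have : k = k' := by exact_mod_cast he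
  subst this
  rfl

theorem tagT_row (scores : List (List Int)) (q : Quad) (hq : q ∈ tagT scores) :
    ∃ s ∈ scores, q.2.1 = rowX s ∧ q.2.2.1 = rowY s := by
  rcases (mem_tagT scores q).mp hq with ⟨k, hk, rfl⟩
  exact ⟨scores[k], List.getElem_mem hk, rfl, rfl⟩

theorem row_tagT (scores : List (List Int)) (s : List Int) (hs : s ∈ scores) :
    ∃ q ∈ tagT scores, q.2.1 = rowX s ∧ q.2.2.1 = rowY s := by
  rcases List.mem_iff_getElem.mp hs with ⟨k, hk, rfl⟩
  exact ⟨((k : Int), rowX scores[k], rowY scores[k], (0 : Int)),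
    (mem_tagT _ _).mpr ⟨k, hk, rfl⟩, rfl, rfl⟩

theorem pairwise_le_getLast (l : List Quad) (h : l ≠ [])
    (hp : l.Pairwise (fun a b => sumQ b ≤ sumQ a)) :
    ∀ e ∈ l, sumQ (l.getLast h) ≤ sumQ e := by
  induction l with
  | nil => exact absurd rfl h
  | cons a t ih =>
    rcases List.pairwise_cons.mp hp with ⟨ha, ht⟩
    intro e he
    cases t with
    | nil =>
      rcases List.mem_singleton.mp he with rfl
      exact le_refl _
    | cons b t' =>
      rw [List.getLast_cons (by simp : (b :: t') ≠ [])]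
      rcases List.mem_cons.mp he with rfl | hmem
      · exact ha _ (List.getLast_mem _)
      · exact ih (by simp) ht e hmem

theorem rankLoopA_eq_map (r : List Quad)
    (hr : r.Pairwise (fun a b => sumQ b ≤ sumQ a)) :
    ∀ (cur pre : List Quad) (hpre : pre ≠ []), r = pre ++ cur →
      rankLoopA cur (sumQ (pre.getLast hpre))
          (1 + ((r.countP (fun e => decide (sumQ (pre.getLast hpre) < sumQ e)) : Nat) : Int))
          ((pre.length : Nat) : Int)
        = cur.map (fun q => (q.1, q.2.1, q.2.2.1,
            1 + ((r.countP (fun e => decide (sumQ q < sumQ e)) : Nat) : Int))) := by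
  intro cur
  induction cur with
  | nil => intro pre hpre hsplit; simp [rankLoopA]
  | cons q cur' ih =>
    intro pre hpre hsplit
    have hPA := List.pairwise_append.mp (hsplit ▸ hr)
    have hpp := hPA.1
    have hqc := hPA.2.1
    have hcross := hPA.2.2
    have hSq : sumQ q ≤ sumQ (pre.getLast hpre) :=
      hcross _ (List.getLast_mem hpre) q List.mem_cons_self
    have hpre_ge : ∀ e ∈ pre, sumQ (pre.getLast hpre) ≤ sumQ e :=
      pairwise_le_getLast pre hpre hpp
    have hcur_le : ∀ e ∈ cur', sumQ e ≤ sumQ q := (List.pairwise_cons.mp hqc).1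
    have hrq : (if sumQ q = sumQ (pre.getLast hpre)
        then 1 + ((r.countP (fun e => decide (sumQ (pre.getLast hpre) < sumQ e)) : Nat) : Int)
        else ((pre.length : Nat) : Int) + 1)
        = 1 + ((r.countP (fun e => decide (sumQ q < sumQ e)) : Nat) : Int) := by
      by_cases hs : sumQ q = sumQ (pre.getLast hpre)
      · rw [if_pos hs, hs]
      · rw [if_neg hs]
        have hcount : r.countP (fun e => decide (sumQ q < sumQ e)) = pre.length := by
          rw [hsplit, List.countP_append]
          have h1 : pre.countP (fun e => decide (sumQ q < sumQ e)) = pre.length :=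
            List.countP_eq_length.mpr (fun e he =>
              decide_eq_true (lt_of_lt_of_le (lt_of_le_of_ne hSq hs) (hpre_ge e he)))
          have h2 : (q :: cur').countP (fun e => decide (sumQ q < sumQ e)) = 0 :=
            List.countP_eq_zero.mpr (by
              intro e he
              rcases List.mem_cons.mp he with rfl | hmem
              · simp
              · simp [not_lt.mpr (hcur_le e hmem)])
          omega
        rw [hcount]
        omega
    simp only [rankLoopA, List.map_cons]
    rw [show q.2.1 + q.2.2.1 = sumQ q from rfl, hrq]
    have hsplit' : r = (pre ++ [q]) ++ cur' := by
      rw [hsplit, List.append_assoc]; rfl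
    have ihq := ih (pre ++ [q]) (by simp) hsplit'
    rw [List.getLast_concat] at ihq
    have hlen : (((pre ++ [q]).length : Nat) : Int) = ((pre.length : Nat) : Int) + 1 := by
      simp
    rw [hlen] at ihq
    rw [ihq]

theorem findAnsA_map (h0 : Quad) (rk : Quad → Int) :
    ∀ L : List Quad, h0 ∈ L → h0.1 = 0 → (∀ q ∈ L, q.1 = 0 → q = h0) →
      findAnsA (L.map (fun q => (q.1, q.2.1, q.2.2.1, rk q))) = rk h0 := by
  intro L
  induction L with
  | nil => intro h; exact absurd h (List.not_mem_nil)
  | cons a t ih =>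
    intro hmem h0id huniq
    simp only [List.map_cons, findAnsA]
    by_cases ha : a.1 = 0
    · rw [if_pos ha, huniq a List.mem_cons_self ha]
    · rw [if_neg ha]
      have hmem' : h0 ∈ t := by
        rcases List.mem_cons.mp hmem with rfl | h
        · exact absurd h0id ha
        · exact h
      exact ih hmem' h0id (fun q hq => huniq q (List.mem_cons_of_mem _ hq))

def SSg (scores : List (List Int)) : List Quad :=
  PySem.List.sorted2 (tagT scores) (fun q => -q.2.1) (fun q => q.2.2.1)

def TMPg (scores : List (List Int)) : PySem.Set Int :=
  sweepA (SSg scores) (-1) PySem.Set.empty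

def rank2g (scores : List (List Int)) : List Quad :=
  PySem.List.sorted
    ((SSg scores).filter (fun q => !(PySem.Set.contains (TMPg scores) q.1)))
    (fun q => q.2.1 + q.2.2.1) true

def ptsg (scores : List (List Int)) : List (Int × Int) :=
  scores.map (fun s => (PySem.List.pyGetD s 0 0, PySem.List.pyGetD s 1 0))

theorem map_tagT_pts (scores : List (List Int)) :
    (tagT scores).map (fun q => (q.2.1, q.2.2.1)) = ptsg scores := by
  unfold tagT ptsg
  rw [List.map_map]
  conv_rhs => rw [← PySem.List.map_snd_enumerate scores 0, List.map_map]
  rfl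

theorem tmp_mem (scores : List (List Int)) (z : Int) :
    z ∈ TMPg scores ↔ ∃ q ∈ tagT scores, q.1 = z ∧
      (q.2.2.1 < -1 ∨ ∃ q' ∈ tagT scores, q.2.1 < q'.2.1 ∧ q.2.2.1 < q'.2.2.1) := by
  have hSSp : (SSg scores).Pairwise lexLe := sorted2_pairwise_lexLe _
  have hperm : (SSg scores).Perm (tagT scores) := PySem.List.sorted2_perm _ _ _ false
  rw [show TMPg scores = sweepA (SSg scores) (-1) PySem.Set.empty from rfl,
    sweepA_mem (SSg scores) hSSp (-1) PySem.Set.empty z]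
  constructor
  · rintro (hfalse | ⟨q, hq, hid, hcase⟩)
    · exact absurd hfalse (List.not_mem_nil)
    · refine ⟨q, hperm.mem_iff.mp hq, hid, ?_⟩
      rcases hcase with h | ⟨q', hq', hd⟩
      · exact Or.inl h
      · exact Or.inr ⟨q', hperm.mem_iff.mp hq', hd⟩
  · rintro ⟨q, hq, hid, hcase⟩
    refine Or.inr ⟨q, hperm.mem_iff.mpr hq, hid, ?_⟩
    rcases hcase with h | ⟨q', hq', hd⟩
    · exact Or.inl h
    · exact Or.inr ⟨q', hperm.mem_iff.mpr hq', hd⟩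

theorem domB_iff (scores : List (List Int)) (x y : Int) :
    dominatedB (ptsg scores) x y = true ↔
      ∃ q' ∈ tagT scores, x < q'.2.1 ∧ y < q'.2.2.1 := by
  rw [← map_tagT_pts]
  simp [dominatedB, List.any_eq_true]

theorem pvU_iff (scores : List (List Int)) (s : List Int) :
    pvU scores s ↔ dominatedB (ptsg scores) (rowX s) (rowY s) = false := by
  unfold pvU ptsg dominatedB rowX rowY
  simp only [List.any_eq_false, List.mem_map, Bool.and_eq_true, decide_eq_true_eq, not_and]
  constructor
  · rintro h p ⟨t, ht, rfl⟩
    intro h1 h2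
    rcases h t ht with h' | h' <;> simp only at h1 h2 <;> omega
  · intro h t ht
    have := h _ ⟨t, ht, rfl⟩
    simp only at this
    omega

theorem contains_tmp (scores : List (List Int)) (z : Int) :
    (PySem.Set.contains (TMPg scores) z = true) ↔ z ∈ TMPg scores :=
  List.contains_iff_mem

theorem head_mem_tagT (s0 : List Int) (tl : List (List Int)) :
    ((0 : Int), rowX s0, rowY s0, (0 : Int)) ∈ tagT (s0 :: tl) :=
  (mem_tagT _ _).mpr ⟨0, by simp, by simp⟩

-- value of A's port when employee 0 survives the sweep
theorem solutionA_val (s0 : List Int) (tl : List (List Int))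
    (hc0 : PySem.Set.contains (TMPg (s0 :: tl)) 0 = false) :
    solution (s0 :: tl) = 1 + (((tagT (s0 :: tl)).countP
      (fun q => decide (rowX s0 + rowY s0 < sumQ q)
        && !PySem.Set.contains (TMPg (s0 :: tl)) q.1) : Nat) : Int) := by
  set x0 := rowX s0 with hx0
  set y0 := rowY s0 with hy0
  have hperm : (SSg (s0 :: tl)).Perm (tagT (s0 :: tl)) :=
    PySem.List.sorted2_perm _ _ _ false
  have h0mem := head_mem_tagT s0 tl
  have huniq : ∀ q ∈ tagT (s0 :: tl), q.1 = 0 → q = ((0 : Int), x0, y0, (0 : Int)) :=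
    fun q hq h => tagT_uniq _ q _ hq h0mem h
  have hsol : solution (s0 :: tl) =
      (if PySem.Set.contains (TMPg (s0 :: tl)) 0 then (-1 : Int) else
        match rank2g (s0 :: tl) with
        | [] => 0
        | q0 :: rest =>
            findAnsA ((q0.1, q0.2.1, q0.2.2.1, (1 : Int)) ::
              rankLoopA rest (q0.2.1 + q0.2.2.1) 1 1)) := rfl
  rw [hsol, hc0]
  simp only [Bool.false_eq_true, if_false]
  have hR2pair : (rank2g (s0 :: tl)).Pairwise (fun a b => sumQ b ≤ sumQ a) :=
    PySem.List.sorted_pairwise_rev _ _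
  have hR2perm : (rank2g (s0 :: tl)).Perm
      ((SSg (s0 :: tl)).filter (fun q => !(PySem.Set.contains (TMPg (s0 :: tl)) q.1))) :=
    PySem.List.sorted_perm _ _ _
  have hR2sub : ∀ q ∈ rank2g (s0 :: tl), q ∈ tagT (s0 :: tl) := by
    intro q hq
    have := hR2perm.mem_iff.mp hq
    exact hperm.mem_iff.mp (List.mem_filter.mp this).1
  have hmemR2 : ((0 : Int), x0, y0, (0 : Int)) ∈ rank2g (s0 :: tl) := by
    rw [show rank2g (s0 :: tl) = PySem.List.sorted
      ((SSg (s0 :: tl)).filter (fun q => !(PySem.Set.contains (TMPg (s0 :: tl)) q.1)))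
      (fun q => q.2.1 + q.2.2.1) true from rfl, PySem.List.mem_sorted, List.mem_filter]
    refine ⟨hperm.mem_iff.mpr h0mem, ?_⟩
    rw [show (((0 : Int), x0, y0, (0 : Int)) : Quad).1 = 0 from rfl, hc0]
    rfl
  have huniqR2 : ∀ q ∈ rank2g (s0 :: tl), q.1 = 0 → q = ((0 : Int), x0, y0, (0 : Int)) :=
    fun q hq h => huniq q (hR2sub q hq) h
  have hbridge : (rank2g (s0 :: tl)).countP
        (fun e => decide (sumQ ((0 : Int), x0, y0, (0 : Int)) < sumQ e))
      = (tagT (s0 :: tl)).countP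
        (fun q => decide (x0 + y0 < sumQ q) && !PySem.Set.contains (TMPg (s0 :: tl)) q.1) := by
    rw [List.Perm.countP_eq _ hR2perm, List.countP_filter, List.Perm.countP_eq _ hperm]
    rfl
  cases hR2 : rank2g (s0 :: tl) with
  | nil => rw [hR2] at hmemR2; exact absurd hmemR2 (List.not_mem_nil)
  | cons q0 rest =>
    have hR2pair' := hR2 ▸ hR2pair
    have hcnt0 : (rank2g (s0 :: tl)).countP (fun e => decide (sumQ q0 < sumQ e)) = 0 := by
      rw [hR2]
      refine List.countP_eq_zero.mpr ?_
      intro e he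
      rcases List.mem_cons.mp he with rfl | hmem
      · simp
      · simp [not_lt.mpr ((List.pairwise_cons.mp hR2pair').1 e hmem)]
    have hloop := rankLoopA_eq_map (rank2g (s0 :: tl)) hR2pair rest [q0] (by simp) hR2
    rw [List.getLast_singleton] at hloop
    rw [hcnt0] at hloop
    norm_num at hloop
    show findAnsA ((q0.1, q0.2.1, q0.2.2.1, (1 : Int)) ::
        rankLoopA rest (q0.2.1 + q0.2.2.1) 1 1) = _
    rw [show (q0.2.1 + q0.2.2.1) = sumQ q0 from rfl, hloop]
    have hhead : (q0.1, q0.2.1, q0.2.2.1, (1 : Int)) = (fun q : Quad => (q.1, q.2.1, q.2.2.1,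
        1 + (((rank2g (s0 :: tl)).countP (fun e => decide (sumQ q < sumQ e)) : Nat) : Int))) q0 := by
      simp [hcnt0]
    rw [hhead, show ((fun q : Quad => (q.1, q.2.1, q.2.2.1,
        1 + (((rank2g (s0 :: tl)).countP (fun e => decide (sumQ q < sumQ e)) : Nat) : Int))) q0 ::
        rest.map (fun q : Quad => (q.1, q.2.1, q.2.2.1,
        1 + (((rank2g (s0 :: tl)).countP (fun e => decide (sumQ q < sumQ e)) : Nat) : Int))))
      = (q0 :: rest).map (fun q : Quad => (q.1, q.2.1, q.2.2.1,
        1 + (((rank2g (s0 :: tl)).countP (fun e => decide (sumQ q < sumQ e)) : Nat) : Int))) from rfl,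
      ← hR2]
    rw [findAnsA_map ((0 : Int), x0, y0, (0 : Int)) _ (rank2g (s0 :: tl)) hmemR2 rfl huniqR2]
    rw [hbridge]

-- value of B's port when employee 0 is not strictly dominated
theorem solutionB_val (s0 : List Int) (tl : List (List Int))
    (hdb : dominatedB (ptsg (s0 :: tl)) (rowX s0) (rowY s0) = false) :
    solution_alt (s0 :: tl) = 1 + (((tagT (s0 :: tl)).countP
      (fun q => decide (rowX s0 + rowY s0 < sumQ q)
        && !dominatedB (ptsg (s0 :: tl)) q.2.1 q.2.2.1) : Nat) : Int) := by
  have halt : solution_alt (s0 :: tl) =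
      (if dominatedB (ptsg (s0 :: tl)) (rowX s0) (rowY s0)
        then (-1 : Int) else
        1 + ((ptsg (s0 :: tl)).countP
          (fun p => decide (rowX s0 + rowY s0 < p.1 + p.2)
            && !dominatedB (ptsg (s0 :: tl)) p.1 p.2) : Int)) := rfl
  rw [halt, hdb]
  simp only [Bool.false_eq_true, if_false]
  rw [← map_tagT_pts, List.countP_map]
  rfl

theorem main_eq (scores : List (List Int)) (hne : scores ≠ [])
    (hnd : ¬ D_solution scores) :
    solution scores = solution_alt scores := by
  obtain ⟨s0, tl, rfl⟩ := List.exists_cons_of_ne_nil hne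
  have hhead : (s0 :: tl).headI = s0 := rfl
  have h0mem := head_mem_tagT s0 tl
  cases hdb : dominatedB (ptsg (s0 :: tl)) (rowX s0) (rowY s0) with
  | true =>
    have hc0 : PySem.Set.contains (TMPg (s0 :: tl)) 0 = true := by
      rcases (domB_iff _ (rowX s0) (rowY s0)).mp hdb with ⟨q', hq', hxy⟩
      exact (contains_tmp _ 0).mpr ((tmp_mem _ 0).mpr
        ⟨_, h0mem, rfl, Or.inr ⟨q', hq', hxy.1, hxy.2⟩⟩)
    show (if PySem.Set.contains (TMPg (s0 :: tl)) 0 then (-1 : Int) else _)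
      = (if dominatedB (ptsg (s0 :: tl)) (rowX s0) (rowY s0) then (-1 : Int) else _)
    rw [hc0, hdb]
    rfl
  | false =>
    have hU0 : pvU (s0 :: tl) s0 := (pvU_iff _ _).mpr hdb
    have hy0n : ¬ rowY s0 < -1 := by
      intro h
      exact hnd ⟨s0, List.mem_cons_self, h, hU0, by rw [hhead]; exact hU0, Or.inl hhead.symm⟩
    have hno : ¬ ∃ s ∈ (s0 :: tl), rowY s < -1 ∧ pvU (s0 :: tl) s ∧
        rowX s0 + rowY s0 < rowX s + rowY s := by
      rintro ⟨s, hs, h1, h2, h3⟩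
      exact hnd ⟨s, hs, h1, h2, by rw [hhead]; exact hU0, Or.inr (by rw [hhead]; exact h3)⟩
    have hc0 : PySem.Set.contains (TMPg (s0 :: tl)) 0 = false := by
      cases hc : PySem.Set.contains (TMPg (s0 :: tl)) 0 with
      | false => rfl
      | true =>
        exfalso
        rcases (tmp_mem _ 0).mp ((contains_tmp _ 0).mp hc) with ⟨q, hq, hid, hcase⟩
        rw [tagT_uniq _ q _ hq h0mem hid] at hcase
        rcases hcase with h | ⟨q', hq', hd⟩
        · exact hy0n h
        · rw [(domB_iff _ (rowX s0) (rowY s0)).mpr ⟨q', hq', hd.1, hd.2⟩] at hdb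
          cases hdb
    rw [solutionA_val s0 tl hc0, solutionB_val s0 tl hdb]
    congr 2
    refine List.countP_congr ?_
    intro q hq
    by_cases hlt : rowX s0 + rowY s0 < sumQ q
    · have hflag : PySem.Set.contains (TMPg (s0 :: tl)) q.1
          = dominatedB (ptsg (s0 :: tl)) q.2.1 q.2.2.1 := by
        cases hdq : dominatedB (ptsg (s0 :: tl)) q.2.1 q.2.2.1 with
        | true =>
          rcases (domB_iff _ _ _).mp hdq with ⟨q', hq', hxy⟩
          exact (contains_tmp _ _).mpr ((tmp_mem _ _).mpr
            ⟨q, hq, rfl, Or.inr ⟨q', hq', hxy.1, hxy.2⟩⟩)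
        | false =>
          cases hcq : PySem.Set.contains (TMPg (s0 :: tl)) q.1 with
          | false => rfl
          | true =>
            exfalso
            rcases (tmp_mem _ _).mp ((contains_tmp _ _).mp hcq) with ⟨q'', hq'', hid, hcase⟩
            rw [tagT_uniq _ q'' q hq'' hq hid] at hcase
            rcases hcase with h | ⟨q', hq', hd⟩
            · rcases tagT_row _ q hq with ⟨s, hs, hqx, hqy⟩
              refine hno ⟨s, hs, by rw [← hqy]; exact h, ?_, ?_⟩
              · refine (pvU_iff _ _).mpr ?_
                rw [← hqx, ← hqy, hdq]
              · rw [← hqx, ← hqy]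
                simpa [sumQ] using hlt
            · rw [(domB_iff _ _ _).mpr ⟨q', hq', hd.1, hd.2⟩] at hdq
              cases hdq
      rw [hflag]
    · have hdec : decide (rowX s0 + rowY s0 < sumQ q) = false :=
        decide_eq_false hlt
      rw [hdec]
      simp

-- helper: strict count inequality from monotone predicates plus one separating element
theorem countP_lt_of_mono {α : Type} (p q : α → Bool) (l : List α)
    (hmono : ∀ a ∈ l, p a = true → q a = true)
    (x : α) (hx : x ∈ l) (hqx : q x = true) (hpx : p x = false) :
    l.countP p < l.countP q := by
  induction l with
  | nil => cases hx
  | cons a t ih =>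
    rw [List.countP_cons, List.countP_cons]
    rcases List.mem_cons.mp hx with rfl | hmem
    · rw [hpx, hqx]
      have hle : t.countP p ≤ t.countP q :=
        List.countP_mono_left (fun b hb hpb => hmono b (List.mem_cons_of_mem _ hb) hpb)
      simp only [Bool.false_eq_true, if_false, if_true]
      omega
    · have hlt := ih (fun b hb hpb => hmono b (List.mem_cons_of_mem _ hb) hpb) hmem
      have : (if p a = true then 1 else 0) ≤ (if q a = true then 1 else 0) := by
        by_cases hp : p a = true
        · rw [if_pos hp, if_pos (hmono a List.mem_cons_self hp)]
        · simp [hp]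
      omega

theorem main_ne (scores : List (List Int)) (hd : D_solution scores) :
    solution scores ≠ solution_alt scores := by
  obtain ⟨s, hs, hsy, hsU, hU0, hor⟩ := hd
  obtain ⟨s0, tl, rfl⟩ := List.exists_cons_of_ne_nil (List.ne_nil_of_mem hs)
  rw [show (s0 :: tl).headI = s0 from rfl] at hU0 hor
  have h0mem := head_mem_tagT s0 tl
  have hdb : dominatedB (ptsg (s0 :: tl)) (rowX s0) (rowY s0) = false :=
    (pvU_iff _ _).mp hU0
  rw [solutionB_val s0 tl hdb]
  by_cases hy : rowY s0 < -1
  · -- A's sweep tags employee 0 itself: A returns -1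
    have hc0 : PySem.Set.contains (TMPg (s0 :: tl)) 0 = true :=
      (contains_tmp _ 0).mpr ((tmp_mem _ 0).mpr ⟨_, h0mem, rfl, Or.inl hy⟩)
    show (if PySem.Set.contains (TMPg (s0 :: tl)) 0 then (-1 : Int) else _) ≠ _
    rw [hc0]
    intro h
    simp only [if_true] at h
    omega
  · -- some other undominated employee with second score < -1 and larger sum
    rcases hor with rfl | hsum
    · exact absurd hsy hy
    have hc0 : PySem.Set.contains (TMPg (s0 :: tl)) 0 = false := by
      cases hc : PySem.Set.contains (TMPg (s0 :: tl)) 0 with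
      | false => rfl
      | true =>
        exfalso
        rcases (tmp_mem _ 0).mp ((contains_tmp _ 0).mp hc) with ⟨q, hq, hid, hcase'⟩
        rw [tagT_uniq _ q _ hq h0mem hid] at hcase'
        rcases hcase' with h | ⟨q', hq', hd'⟩
        · exact hy h
        · rw [(domB_iff _ _ _).mpr ⟨q', hq', hd'.1, hd'.2⟩] at hdb
          cases hdb
    rw [solutionA_val s0 tl hc0]
    -- A's count is strictly smaller than B's: the witness row is counted by B, not by A
    rcases row_tagT _ s hs with ⟨qw, hqw, hqwx, hqwy⟩
    have hlt : (tagT (s0 :: tl)).countP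
          (fun q => decide (rowX s0 + rowY s0 < sumQ q)
            && !PySem.Set.contains (TMPg (s0 :: tl)) q.1)
        < (tagT (s0 :: tl)).countP
          (fun q => decide (rowX s0 + rowY s0 < sumQ q)
            && !dominatedB (ptsg (s0 :: tl)) q.2.1 q.2.2.1) := by
      refine countP_lt_of_mono _ _ _ ?_ qw hqw ?_ ?_
      · intro q hq hpq
        simp only [Bool.and_eq_true] at hpq ⊢
        refine ⟨hpq.1, ?_⟩
        cases hdq : dominatedB (ptsg (s0 :: tl)) q.2.1 q.2.2.1 with
        | false => simp
        | true =>
          exfalso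
          rcases (domB_iff _ _ _).mp hdq with ⟨q', hq', hxy⟩
          have hct := (contains_tmp _ _).mpr ((tmp_mem _ _).mpr
            ⟨q, hq, rfl, Or.inr ⟨q', hq', hxy.1, hxy.2⟩⟩)
          rw [hct] at hpq
          simpa using hpq.2
      · simp only [Bool.and_eq_true]
        refine ⟨decide_eq_true ?_, ?_⟩
        · simpa [sumQ, hqwx, hqwy] using hsum
        · cases hdq : dominatedB (ptsg (s0 :: tl)) qw.2.1 qw.2.2.1 with
          | false => simp
          | true =>
            exfalso
            rw [hqwx, hqwy, (pvU_iff _ _).mp hsU] at hdq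
            cases hdq
      · have hcqw : PySem.Set.contains (TMPg (s0 :: tl)) qw.1 = true :=
          (contains_tmp _ _).mpr ((tmp_mem _ _).mpr
            ⟨qw, hqw, rfl, Or.inl (by rw [hqwy]; exact hsy)⟩)
        rw [hcqw]
        simp
    intro h
    omega

-- ===== VERDICT (by name: the statement is the Claim_ definition above) =====
theorem solution_spec : Claim_unchanged_solution := by
  intro scores _ hpre
  unfold Spec_solution
  intro hnd
  exact main_eq scores hpre.1 hnd

theorem solution_changed : Claim_changed_solution := by
  unfold Claim_changed_solution
  decide

theorem solution_tight : Claim_exact_solution := by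
  intro scores _ _ hd
  exact main_ne scores hd
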